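-- pv_equiv track=rewrite | github.com/daisycrego/dar | phone-numbers/scripts/phone-number-v1.py | checkForNull
-- ===== SOURCE A (Python) =====
-- def checkForNull(x):
--     # A null phone number (aside from an empty string) has all consecutive digits, e.g. 999-999-9999
--     # Note that it still must have 10 digits, although 12 is acceptable if it's +19999999999
--     # Note --> we are assuming the input string was already stripped of non-alphabetic chars and spaces
--     str_len = len(x)
--     if not str_len:
--         return True
--     if str_len >= 5 and str_len < 15:
--         # check for leading + or +1
--         if "+" in x[:2]:
--             if x[:2] == "+1":
--                 return checkForNull(x[2:])
--             else:
--                 return checkForNull(x[1:])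
--         else:
--             return True if x.count(x[0]) == len(x) else False
--     else:
--         return False
-- ===== SOURCE B (Python) =====
-- def checkForNull(x):
--     # Same predicate, but as an explicit worklist loop over the char list instead of
--     # slice-recursion on the string; final all-same-digit test uses list element count.
--     cs = list(x)
--     while len(cs) >= 2:
--         n = len(cs)
--         if n < 5 or n >= 15:
--             return False
--         c1, c2 = cs[0], cs[1]
--         if c1 != '+' and c2 != '+':
--             return cs.count(c1) == n
--         if c1 == '+' and c2 == '1':
--             del cs[:2]
--         else:
--             del cs[:1]
--     return len(cs) == 0
-- ===== Notes on version B (the rewrite author's own statement) =====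
-- stated objective: alternative
-- what changed: Replaces A's slice-and-recurse on the string (x[1:]/x[2:] with a fresh recursive call per stripped prefix) by a single explicit worklist loop over the character list that re-checks the length guard each iteration and finishes with a list element count instead of a substring count.
import Mathlib
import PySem

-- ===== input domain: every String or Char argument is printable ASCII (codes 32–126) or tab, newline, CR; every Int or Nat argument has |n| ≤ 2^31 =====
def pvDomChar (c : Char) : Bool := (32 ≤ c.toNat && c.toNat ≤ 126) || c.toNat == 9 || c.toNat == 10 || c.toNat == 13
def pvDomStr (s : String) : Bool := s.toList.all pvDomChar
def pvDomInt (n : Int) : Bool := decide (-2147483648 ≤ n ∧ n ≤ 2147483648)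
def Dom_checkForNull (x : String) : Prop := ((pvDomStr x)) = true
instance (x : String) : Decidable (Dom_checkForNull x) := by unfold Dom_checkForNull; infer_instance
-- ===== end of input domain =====

-- B replaces A's slice-and-recurse structure by an explicit worklist loop over the char list
-- (objective: alternative decomposition; same asymptotic cost).


-- ===== PORT A =====
-- literal transliteration of A: guard on len, strip "+1"/one leading char and recurse,
-- else compare x.count(x[0]) with len(x).  x[0] cannot raise here (len ≥ 5), ported via pyGet? with Option.elim.
def checkForNull (x : String) : Bool :=
  if PySem.Str.len x = 0 then
    true
  else if h : 5 ≤ PySem.Str.len x ∧ PySem.Str.len x < 15 then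
    if PySem.Str.isIn "+" (PySem.Str.slice x none (some 2)) then
      if PySem.Str.slice x none (some 2) = "+1" then
        checkForNull (PySem.Str.slice x (some 2) none)
      else
        checkForNull (PySem.Str.slice x (some 1) none)
    else
      if ((PySem.Str.count x (String.ofList ((PySem.Str.pyGet? x 0).elim [] (fun c => [c]))) : Int)
            = PySem.Str.len x) then true else false
  else
    false
termination_by x.toList.length
decreasing_by
  all_goals
    simp only [PySem.Str.toList_slice, PySem.Chars.slice_eq_listSlice]
    have hl := PySem.Str.len_eq x
    first
      | rw [PySem.List.slice_from x.toList (by norm_num : (0:ℤ) ≤ 2)]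
      | rw [PySem.List.slice_from x.toList (by norm_num : (0:ℤ) ≤ 1)]
    simp only [List.length_drop]
    omega

-- ===== PORT B =====
-- B's loop: the worklist is the char list; each iteration re-checks the length guard,
-- strips "+1" or one char, or answers with an element count.
def pvBLoop : List Char → Bool
  | [] => true
  | [_] => false
  | c1 :: c2 :: rest =>
    if rest.length + 2 < 5 ∨ 15 ≤ rest.length + 2 then false
    else if c1 ≠ '+' ∧ c2 ≠ '+' then decide ((c1 :: c2 :: rest).count c1 = rest.length + 2)
    else if c1 = '+' ∧ c2 = '1' then pvBLoop rest
    else pvBLoop (c2 :: rest)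
termination_by cs => cs.length

def checkForNull_alt (x : String) : Bool := pvBLoop x.toList

-- ===== PRECONDITION & SPEC =====
def Spec_checkForNull (x : String) (out : Bool) : Prop := out = checkForNull_alt x
instance (x : String) (out : Bool) : Decidable (Spec_checkForNull x out) := by unfold Spec_checkForNull; infer_instance

-- ===== CLAIM (what is proved, stated in full; the proofs are below) =====
def Claim_equal_checkForNull : Prop := ∀ (x : String), Dom_checkForNull x → Spec_checkForNull x (checkForNull x)

-- ===== LEMMAS AND PROOFS =====

-- Python str.count of a single-character pattern is the element count.
lemma count_go_singleton (c : Char) : ∀ (l : List Char) (fuel acc : Nat), l.length ≤ fuel →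
    PySem.Chars.count.go [c] fuel l acc = acc + l.count c := by
  intro l
  induction l with
  | nil => intro fuel acc _; cases fuel <;> simp [PySem.Chars.count.go]
  | cons h t ih =>
    intro fuel acc hle
    cases fuel with
    | zero => simp at hle
    | succ f =>
      by_cases hc : c = h
      · subst hc
        simp only [PySem.Chars.count.go, List.isPrefixOf, BEq.rfl, Bool.true_and,
          if_true, List.length_cons, List.length_nil,
          List.drop_succ_cons, List.drop_zero]
        rw [ih f (acc + 1) (by simpa using hle)]
        simp
        omega
      · have hbe : (c == h) = false := by simpa using hc
        simp only [PySem.Chars.count.go, List.isPrefixOf, hbe, Bool.false_and]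
        rw [ih f acc (by simpa using hle)]
        have hne : ¬ (h = c) := fun e => hc e.symm
        simp [hne]

lemma count_singleton (l : List Char) (c : Char) : PySem.Chars.count l [c] = l.count c := by
  simp [PySem.Chars.count, count_go_singleton c l l.length 0 le_rfl]

lemma plus_infix_pair (c1 c2 : Char) : ['+'] <:+: [c1, c2] ↔ c1 = '+' ∨ c2 = '+' := by
  constructor
  · intro h
    have hm := List.singleton_sublist.mp h.sublist
    simp only [List.mem_cons, List.not_mem_nil, or_false] at hm
    rcases hm with h1 | h2
    · exact Or.inl h1.symm
    · exact Or.inr h2.symm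
  · rintro (rfl | rfl)
    · exact ⟨[], [c2], rfl⟩
    · exact ⟨[c1], [], rfl⟩

set_option maxHeartbeats 1000000 in
lemma main_lemma : ∀ (n : Nat) (l : List Char), l.length ≤ n →
    checkForNull (String.ofList l) = pvBLoop l := by
  intro n
  induction n with
  | zero =>
    intro l hl
    have : l = [] := List.eq_nil_of_length_eq_zero (by omega)
    subst this
    rw [checkForNull]
    simp [PySem.Str.len_eq, pvBLoop]
  | succ m ih =>
    intro l hl
    match l with
    | [] =>
      rw [checkForNull]
      simp [PySem.Str.len_eq, pvBLoop]
    | [c] =>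
      rw [checkForNull]
      simp [PySem.Str.len_eq, pvBLoop]
    | c1 :: c2 :: rest =>
      rw [checkForNull]
      have hlen : PySem.Str.len (String.ofList (c1 :: c2 :: rest)) = (rest.length : Int) + 2 := by
        simp [PySem.Str.len_eq]; ring
      have hne0 : ¬ PySem.Str.len (String.ofList (c1 :: c2 :: rest)) = 0 := by
        rw [hlen]; omega
      by_cases hg : 5 ≤ rest.length + 2 ∧ rest.length + 2 < 15
      · -- guard holds
        have hg' : ¬ (rest.length + 2 < 5 ∨ 15 ≤ rest.length + 2) := by omega
        have hgI : 5 ≤ PySem.Str.len (String.ofList (c1 :: c2 :: rest)) ∧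
            PySem.Str.len (String.ofList (c1 :: c2 :: rest)) < 15 := by
          rw [hlen]; omega
        have htake : (PySem.Str.slice (String.ofList (c1 :: c2 :: rest)) none (some 2)).toList
            = [c1, c2] := by
          simp only [PySem.Str.toList_slice, PySem.Chars.slice_eq_listSlice, String.toList_ofList]
          rw [PySem.List.slice_to (c1 :: c2 :: rest) (by norm_num : (0:ℤ) ≤ 2)]
          simp [List.take_succ_cons]
        have hdrop2 : (PySem.Str.slice (String.ofList (c1 :: c2 :: rest)) (some 2) none).toList
            = rest := by
          simp only [PySem.Str.toList_slice, PySem.Chars.slice_eq_listSlice, String.toList_ofList]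
          rw [PySem.List.slice_from (c1 :: c2 :: rest) (by norm_num : (0:ℤ) ≤ 2)]
          simp
        have hdrop1 : (PySem.Str.slice (String.ofList (c1 :: c2 :: rest)) (some 1) none).toList
            = c2 :: rest := by
          simp only [PySem.Str.toList_slice, PySem.Chars.slice_eq_listSlice, String.toList_ofList]
          rw [PySem.List.slice_from (c1 :: c2 :: rest) (by norm_num : (0:ℤ) ≤ 1)]
          simp
        have hplus1 : (PySem.Str.slice (String.ofList (c1 :: c2 :: rest)) none (some 2) = "+1")
            ↔ (c1 = '+' ∧ c2 = '1') := by
          constructor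
          · intro h
            have := congrArg String.toList h
            rw [htake] at this
            simp_all
          · rintro ⟨rfl, rfl⟩
            have : (PySem.Str.slice (String.ofList ('+' :: '1' :: rest)) none (some 2)).toList
                = ("+1" : String).toList := by rw [htake]; decide
            exact String.toList_inj.mp this
        rw [if_neg hne0, dif_pos hgI]
        by_cases hp : c1 = '+' ∨ c2 = '+'
        · -- '+' present: A recurses, B loops
          have hisIn : PySem.Str.isIn "+"
              (PySem.Str.slice (String.ofList (c1 :: c2 :: rest)) none (some 2)) = true := by
            rw [PySem.Str.isIn_iff_infix, htake]
            exact (plus_infix_pair c1 c2).mpr hp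
          rw [if_pos hisIn]
          have hb1 : ¬ (c1 ≠ '+' ∧ c2 ≠ '+') := fun h => h.elim (fun h1 h2 => hp.elim h1 h2)
          by_cases hq : c1 = '+' ∧ c2 = '1'
          · rw [if_pos (hplus1.mpr hq)]
            have hA : checkForNull (PySem.Str.slice (String.ofList (c1 :: c2 :: rest)) (some 2) none)
                = pvBLoop rest := by
              rw [show PySem.Str.slice (String.ofList (c1 :: c2 :: rest)) (some 2) none
                    = String.ofList rest from by
                  rw [← String.toList_inj, hdrop2, String.toList_ofList]]
              exact ih rest (by simp at hl; omega)
            rw [hA, pvBLoop, if_neg hg', if_neg hb1, if_pos hq]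
          · rw [if_neg (fun h => hq (hplus1.mp h))]
            have hA : checkForNull (PySem.Str.slice (String.ofList (c1 :: c2 :: rest)) (some 1) none)
                = pvBLoop (c2 :: rest) := by
              rw [show PySem.Str.slice (String.ofList (c1 :: c2 :: rest)) (some 1) none
                    = String.ofList (c2 :: rest) from by
                  rw [← String.toList_inj, hdrop1, String.toList_ofList]]
              exact ih (c2 :: rest) (by simp at hl ⊢; omega)
            rw [hA, pvBLoop, if_neg hg', if_neg hb1, if_neg hq]
        · -- no '+': both compare the count with the length
          have hisIn : PySem.Str.isIn "+"
              (PySem.Str.slice (String.ofList (c1 :: c2 :: rest)) none (some 2)) = false := by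
            apply Bool.eq_false_iff.mpr
            intro htrue
            rw [PySem.Str.isIn_iff_infix, htake] at htrue
            exact hp ((plus_infix_pair c1 c2).mp htrue)
          rw [if_neg (by rw [hisIn]; exact Bool.false_ne_true)]
          have hb1 : c1 ≠ '+' ∧ c2 ≠ '+' := ⟨fun e => hp (Or.inl e), fun e => hp (Or.inr e)⟩
          rw [pvBLoop, if_neg hg', if_pos hb1]
          have hget : (PySem.Str.pyGet? (String.ofList (c1 :: c2 :: rest)) 0).elim [] (fun c => [c])
              = [c1] := by
            have h0 : PySem.Str.pyGet? (String.ofList (c1 :: c2 :: rest)) 0 = some c1 := by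
              rw [show (0 : Int) = ((0 : Nat) : Int) from rfl, PySem.Str.pyGet?_natCast]
              simp
            rw [h0]
            rfl
          rw [hget]
          rw [show PySem.Str.count (String.ofList (c1 :: c2 :: rest)) (String.ofList [c1])
                = (c1 :: c2 :: rest).count c1 from by
              rw [PySem.Str.count_eq]
              simp [count_singleton]]
          rw [hlen]
          by_cases hcnt : (c1 :: c2 :: rest).count c1 = rest.length + 2
          · rw [if_pos (by rw [hcnt]; push_cast; ring), decide_eq_true hcnt]
          · rw [if_neg (fun h => hcnt (by exact_mod_cast (by omega :
                  ((c1 :: c2 :: rest).count c1 : Int) = (rest.length : Int) + 2))),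
              decide_eq_false hcnt]
      · -- guard fails (and the list is nonempty): both return false
        rw [if_neg hne0, dif_neg (by rw [hlen]; omega)]
        rw [pvBLoop, if_pos (by omega)]

-- ===== VERDICT (by name: the statement is the Claim_ definition above) =====
theorem checkForNull_spec : Claim_equal_checkForNull := by
  intro x _
  unfold Spec_checkForNull checkForNull_alt
  have := main_lemma x.toList.length x.toList le_rfl
  rwa [show String.ofList x.toList = x from String.toList_inj.mp (by simp)] at this
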